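-- pv_equiv track=rewrite | github.com/Rianito/cit-qualified-2022 | exercise04/Python/solution.py | calcula_top_ocorrencias_de_queries
-- ===== SOURCE A (Python) =====
-- def getMaior(elementos):
--     maior = 0
--     for i in range(len(elementos)):
--         if elementos[i][1] > elementos[maior][1]:
--             maior = i
--             continue
--         elif elementos[i][1] == elementos[maior][1]:
--             if elementos[i][2] < elementos[maior][2]:
--                 maior = i
--     return maior
--
-- def calcula_top_ocorrencias_de_queries(texto, queries, k):
--     elementos = [[termo, texto.count(termo), texto.find(termo)]
--                  for termo in queries]
--     resultado = []
--     while len(resultado) < k: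
--         maior = getMaior(elementos)
--         resultado.append(elementos[maior])
--         elementos.pop(maior)
--     return [resultado[0] for resultado in resultado]
-- ===== SOURCE B (Python) =====
-- def calcula_top_ocorrencias_de_queries(texto, queries, k):
--     # Sort once by (count desc, first position asc, original index asc), then take the top k.
--     ranked = sorted((-texto.count(t), texto.find(t), i) for i, t in enumerate(queries))
--     return [queries[i] for (_c, _p, i) in ranked[:max(k, 0)]]
-- ===== Notes on version B (the rewrite author's own statement) =====
-- stated objective: faster
-- what changed: Replaces A's repeated getMaior argmax scans with pop (selection of the top element k times, O(n*k)) by a single stable sort on the key (-count, first position, original index) followed by taking the first k terms (O(n log n) comparisons).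
import Mathlib
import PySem

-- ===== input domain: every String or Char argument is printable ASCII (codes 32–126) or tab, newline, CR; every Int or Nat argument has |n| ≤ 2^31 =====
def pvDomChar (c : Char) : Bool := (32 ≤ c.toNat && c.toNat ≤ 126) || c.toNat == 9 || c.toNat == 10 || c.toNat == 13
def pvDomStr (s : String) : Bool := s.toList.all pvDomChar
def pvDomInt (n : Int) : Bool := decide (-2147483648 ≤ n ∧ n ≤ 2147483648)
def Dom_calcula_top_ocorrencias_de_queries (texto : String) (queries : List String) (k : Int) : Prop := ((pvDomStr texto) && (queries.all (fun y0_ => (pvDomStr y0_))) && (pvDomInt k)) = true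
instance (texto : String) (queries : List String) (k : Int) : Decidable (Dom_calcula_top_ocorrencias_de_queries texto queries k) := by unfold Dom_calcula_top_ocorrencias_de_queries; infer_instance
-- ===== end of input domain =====

-- B replaces A's repeated full-list argmax scans (selection of the top element k times)
-- by a single stable sort on the key (-count, first position, original index) followed by take k.


-- ===== PORT A =====
-- getMaior: index of the element with the largest count, ties broken by smaller find-position,
-- further ties keep the earlier index (strict comparisons, as in the Python).
def pvStep (elementos : List (String × Int × Int)) (maior i : Int) : Int :=
  let ei := PySem.List.pyGetD elementos i ("", 0, 0)
  let em := PySem.List.pyGetD elementos maior ("", 0, 0)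
  if ei.2.1 > em.2.1 then i
  else if ei.2.1 = em.2.1 then (if ei.2.2 < em.2.2 then i else maior)
  else maior

def getMaior (elementos : List (String × Int × Int)) : Int :=
  (PySem.List.pyRange 0 (elementos.length : Int) 1).foldl (pvStep elementos) 0

-- the 'while len(resultado) < k' loop; Python raises IndexError when elementos is exhausted
-- (pop? = none), which Pre_ excludes — the port just stops there.
def pvLoopA (elementos : List (String × Int × Int)) (resultado : List (String × Int × Int))
    (k : Int) : List (String × Int × Int) :=
  if (resultado.length : Int) < k then
    match h : PySem.List.pop? elementos (getMaior elementos) with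
    | some (x, rest) => pvLoopA rest (resultado ++ [x]) k
    | none => resultado
  else resultado
termination_by elementos.length
decreasing_by
  have := PySem.List.length_of_pop?_eq_some (h := h)
  simp at this; omega

def calcula_top_ocorrencias_de_queries (texto : String) (queries : List String) (k : Int) : List String :=
  let elementos := queries.map (fun termo =>
    (termo, (PySem.Str.count texto termo : Int), PySem.Str.find texto termo))
  (pvLoopA elementos [] k).map (fun r => r.1)

-- ===== PORT B =====
-- sorted(...) on 3-tuples: Python's tuple order is lexicographic, encoded with toLex (Mathlib's
-- plain Prod '<' is pointwise, not Python's); queries[i] with i from enumerate is always in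
-- range, so pyGetD's default is never used.
def calcula_top_ocorrencias_de_queries_alt (texto : String) (queries : List String) (k : Int) : List String :=
  let ranked := PySem.List.sorted
    ((PySem.List.enumerate queries).map (fun p =>
      (-(PySem.Str.count texto p.2 : Int), PySem.Str.find texto p.2, p.1)))
    (fun tr => (toLex (tr.1, toLex (tr.2.1, tr.2.2)) : Int ×ₗ Int ×ₗ Int))
  (PySem.List.slice ranked none (some (max k 0))).map
    (fun tr => PySem.List.pyGetD queries tr.2.2 "")

-- ===== PRECONDITION & SPEC =====
-- Pre_ excludes exactly the inputs where A raises IndexError: k > len(queries) makes the while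
-- loop pop from an exhausted list.
def Pre_calcula_top_ocorrencias_de_queries (texto : String) (queries : List String) (k : Int) : Prop :=
  k ≤ (queries.length : Int)
instance (texto : String) (queries : List String) (k : Int) : Decidable (Pre_calcula_top_ocorrencias_de_queries texto queries k) := by unfold Pre_calcula_top_ocorrencias_de_queries; infer_instance

def pvWitness_calcula_top_ocorrencias_de_queries : String × List String × Int :=
  ("ab ba b", ["a", "b", "ab"], 2)

def Spec_calcula_top_ocorrencias_de_queries (texto : String) (queries : List String) (k : Int) (out : List String) : Prop := out = calcula_top_ocorrencias_de_queries_alt texto queries k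
instance (texto : String) (queries : List String) (k : Int) (out : List String) : Decidable (Spec_calcula_top_ocorrencias_de_queries texto queries k out) := by unfold Spec_calcula_top_ocorrencias_de_queries; infer_instance

-- ===== CLAIM (what is proved, stated in full; the proofs are below) =====
def Claim_equal_calcula_top_ocorrencias_de_queries : Prop := ∀ (texto : String) (queries : List String) (k : Int), Dom_calcula_top_ocorrencias_de_queries texto queries k → Pre_calcula_top_ocorrencias_de_queries texto queries k → Spec_calcula_top_ocorrencias_de_queries texto queries k (calcula_top_ocorrencias_de_queries texto queries k)
-- ===== LEMMAS AND PROOFS =====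

-- the indexed element list both programs are secretly working over
def pvL (texto : String) (queries : List String) : List (Int × (String × Int × Int)) :=
  (PySem.List.enumerate queries).map (fun p =>
    (p.1, (p.2, (PySem.Str.count texto p.2 : Int), PySem.Str.find texto p.2)))

-- the strict total order: count descending, position ascending, original index ascending
def pvKey (x : Int × (String × Int × Int)) : Int ×ₗ Int ×ₗ Int :=
  toLex (-(x.2.2.1), toLex (x.2.2.2, x.1))

def pvTriple (x : Int × (String × Int × Int)) : Int × Int × Int :=
  (-(x.2.2.1), x.2.2.2, x.1)

-- abstract selection sequence: repeatedly pick getMaior and erase it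
def pvSel : Nat → List (Int × (String × Int × Int)) → List (Int × (String × Int × Int))
  | 0, _ => []
  | fuel + 1, L =>
    if L = [] then [] else
      let m := (getMaior (L.map (fun x => x.2))).toNat
      L.getD m (0, ("", 0, 0)) :: pvSel fuel (L.eraseIdx m)

def pvInc (L : List (Int × (String × Int × Int))) : Prop :=
  L.Pairwise (fun a b => a.1 < b.1)

theorem pvKey_lt_iff (x y : Int × (String × Int × Int)) :
    pvKey x < pvKey y ↔ (-(x.2.2.1) < -(y.2.2.1) ∨
      (-(x.2.2.1) = -(y.2.2.1) ∧ (x.2.2.2 < y.2.2.2 ∨ (x.2.2.2 = y.2.2.2 ∧ x.1 < y.1)))) := by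
  simp [pvKey, Prod.Lex.toLex_lt_toLex]

theorem pvStep_spec (L : List (Int × (String × Int × Int))) (hInc : pvInc L)
    (m a : Nat) (hm : m < L.length) (ha : a < L.length) (hma : m ≤ a) :
    ∃ m' : Nat, ∃ hm' : m' < L.length,
      pvStep (L.map (fun x => x.2)) (m : Int) (a : Int) = (m' : Int) ∧
      (m' = a ∨ m' = m) ∧
      (∀ hx : m ≠ a, (pvKey (L[m']'hm') < pvKey (L[m]'hm) ∨ m' = m) ∧
        (pvKey (L[m']'hm') < pvKey (L[a]'ha) ∨ m' = a)) := by
  have hlen : (L.map (fun x => x.2)).length = L.length := by simp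
  have hgm : PySem.List.pyGetD (L.map (fun x => x.2)) (m : Int) ("", 0, 0) = (L[m]'hm).2 := by
    rw [PySem.List.pyGetD_natCast]
    rw [List.getD_eq_getElem _ _ (by omega : m < (L.map (fun x => x.2)).length)]
    simp
  have hga : PySem.List.pyGetD (L.map (fun x => x.2)) (a : Int) ("", 0, 0) = (L[a]'ha).2 := by
    rw [PySem.List.pyGetD_natCast]
    rw [List.getD_eq_getElem _ _ (by omega : a < (L.map (fun x => x.2)).length)]
    simp
  have hidx : ∀ hx : m ≠ a, (L[m]'hm).1 < (L[a]'ha).1 := by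
    intro hx
    exact (List.pairwise_iff_getElem.mp hInc) m a hm ha (by omega)
  unfold pvStep
  rw [hgm, hga]
  by_cases h1 : (L[a]'ha).2.2.1 > (L[m]'hm).2.2.1
  · refine ⟨a, ha, by simp [h1], Or.inl rfl, fun hx => ⟨Or.inl ?_, Or.inr rfl⟩⟩
    rw [pvKey_lt_iff]; omega
  · by_cases h2 : (L[a]'ha).2.2.1 = (L[m]'hm).2.2.1
    · by_cases h3 : (L[a]'ha).2.2.2 < (L[m]'hm).2.2.2
      · refine ⟨a, ha, by simp [h2, h3], Or.inl rfl, fun hx => ⟨Or.inl ?_, Or.inr rfl⟩⟩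
        rw [pvKey_lt_iff]; omega
      · refine ⟨m, hm, by simp [h2, h3], Or.inr rfl, fun hx => ⟨Or.inr rfl, Or.inl ?_⟩⟩
        have := hidx hx
        rw [pvKey_lt_iff]; omega
    · refine ⟨m, hm, by simp [h1, h2], Or.inr rfl, fun hx => ⟨Or.inr rfl, Or.inl ?_⟩⟩
      rw [pvKey_lt_iff]; omega

theorem pvFold_inv (L : List (Int × (String × Int × Int))) (hInc : pvInc L) :
    ∀ (b a : Nat), a + b = L.length →
    ∀ (m : Nat) (hm : m < L.length), m < a →
    (∀ j, (hj : j < L.length) → j < a → j ≠ m → pvKey (L[m]'hm) < pvKey (L[j]'hj)) →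
    ∃ m' : Nat, ∃ hm' : m' < L.length,
      (PySem.List.pyRange (a : Int) ((L.map (fun x => x.2)).length : Int) 1).foldl
        (pvStep (L.map (fun x => x.2))) (m : Int) = (m' : Int) ∧
      ∀ j, (hj : j < L.length) → j ≠ m' → pvKey (L[m']'hm') < pvKey (L[j]'hj) := by
  intro b
  induction b with
  | zero =>
    intro a hab m hm hma hmin
    rw [PySem.List.pyRange_one_eq_nil (by simp; omega)]
    exact ⟨m, hm, rfl, fun j hj hjm => hmin j hj (by omega) hjm⟩
  | succ b ih =>
    intro a hab m hm hma hmin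
    have ha : a < L.length := by omega
    rw [PySem.List.pyRange_one_cons (by simp; omega)]
    simp only [List.foldl_cons]
    obtain ⟨m2, hm2, hstep, hcase, hlt⟩ := pvStep_spec L hInc m a hm ha (by omega)
    rw [hstep]
    have hx : m ≠ a := by omega
    obtain ⟨hltm, hlta⟩ := hlt hx
    have : ((a : Int) + 1) = ((a + 1 : Nat) : Int) := by push_cast; ring
    rw [this]
    refine ih (a + 1) (by omega) m2 hm2 (by omega) ?_
    intro j hj hja hjm2
    rcases Nat.lt_or_ge j a with hj' | hj'
    · -- j < a : compare through the old minimum m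
      rcases hcase with h | h
      · -- m2 = a; key m2 < key m ≤ key j
        by_cases hjm : j = m
        · subst hjm
          rcases hltm with h' | h'
          · exact h'
          · omega
        · have h1 : pvKey (L[m]'hm) < pvKey (L[j]'hj) := hmin j hj hj' hjm
          rcases hltm with h' | h'
          · exact lt_trans h' h1
          · subst h; omega
      · -- m2 = m
        subst h
        exact hmin j hj hj' hjm2
    · -- j = a
      have : j = a := by omega
      subst this
      rcases hlta with h' | h'
      · exact h'
      · omega

theorem pvGetMaior_spec (L : List (Int × (String × Int × Int))) (hInc : pvInc L) (hne : L ≠ []) :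
    ∃ m : Nat, ∃ hm : m < L.length, getMaior (L.map (fun x => x.2)) = (m : Int) ∧
      ∀ j, (hj : j < L.length) → j ≠ m → pvKey (L[m]'hm) < pvKey (L[j]'hj) := by
  have hlen0 : 0 < L.length := List.length_pos_iff.mpr hne
  unfold getMaior
  rw [PySem.List.pyRange_one_cons (by simp; omega)]
  simp only [List.foldl_cons]
  have hstep0 : pvStep (L.map (fun x => x.2)) 0 0 = 0 := by
    unfold pvStep; simp
  rw [hstep0]
  have h01 : ((0 : Int) + 1) = ((1 : Nat) : Int) := by norm_num
  rw [h01]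
  have h0 : (0 : Int) = ((0 : Nat) : Int) := by norm_num
  rw [h0]
  exact pvFold_inv L hInc (L.length - 1) 1 (by omega) 0 hlen0 (by omega)
    (fun j hj hj1 hj0 => by omega)

theorem pvLoopA_eq_sel (n : Nat) (L : List (Int × (String × Int × Int))) (hn : L.length = n)
    (hInc : pvInc L) (res : List (String × Int × Int)) (k : Int)
    (hk : k - res.length ≤ (n : Int)) :
    pvLoopA (L.map (fun x => x.2)) res k
      = res ++ ((pvSel n L).take (k - res.length).toNat).map (fun x => x.2) := by
  induction n generalizing L res with
  | zero =>
    have hL : L = [] := List.length_eq_zero_iff.mp hn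
    subst hL
    rw [pvLoopA]
    by_cases hrk : ((res.length : Int) < k)
    · have h0 : getMaior ([] : List (String × Int × Int)) = 0 := rfl
      simp [hrk, PySem.List.pop?, PySem.List.pyIdx?, h0, pvSel]
    · simp [hrk, pvSel]
  | succ n ih =>
    have hne : L ≠ [] := by intro h; subst h; simp at hn
    rw [pvLoopA]
    by_cases hrk : ((res.length : Int) < k)
    · obtain ⟨m, hm, heq, hmin⟩ := pvGetMaior_spec L hInc hne
      have hm' : m < (L.map (fun x => x.2)).length := by simp; omega
      rw [heq, PySem.List.pop?_natCast _ _ hm']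
      simp only [hrk, if_true]
      have hget : (L.map (fun x => x.2))[m]'hm' = (L[m]'hm).2 := by simp
      have herase : (L.map (fun x => x.2)).eraseIdx m = (L.eraseIdx m).map (fun x => x.2) :=
        List.eraseIdx_map _ L m
      rw [hget, herase]
      have hlen' : (L.eraseIdx m).length = n := by rw [List.length_eraseIdx]; simp [hm]; omega
      have hinc' : pvInc (L.eraseIdx m) := List.Pairwise.sublist (List.eraseIdx_sublist L m) hInc
      rw [ih (L.eraseIdx m) hlen' hinc' (res ++ [(L[m]'hm).2]) (by simp; omega)]
      have hsel : pvSel (n + 1) L = (L[m]'hm) :: pvSel n (L.eraseIdx m) := by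
        rw [pvSel]
        simp only [hne, if_false]
        rw [heq]
        simp only [Int.toNat_natCast]
        rw [List.getD_eq_getElem _ _ hm]
      rw [hsel]
      have htake : ((L[m]'hm) :: pvSel n (L.eraseIdx m)).take (k - res.length).toNat
          = (L[m]'hm) :: (pvSel n (L.eraseIdx m)).take (k - (res ++ [(L[m]'hm).2]).length).toNat := by
        have h1 : (k - res.length).toNat = ((k - (res ++ [(L[m]'hm).2]).length).toNat) + 1 := by
          simp; omega
        rw [h1, List.take_succ_cons]
      rw [htake]
      simp
    · simp only [hrk, if_false]
      have : (k - (res.length : Int)).toNat = 0 := by omega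
      rw [this]
      simp

theorem pvSel_perm (n : Nat) (L : List (Int × (String × Int × Int))) (hn : L.length = n)
    (hInc : pvInc L) : (pvSel n L).Perm L := by
  induction n generalizing L with
  | zero =>
    have hL : L = [] := List.length_eq_zero_iff.mp hn
    subst hL; simp [pvSel]
  | succ n ih =>
    have hne : L ≠ [] := by intro h; subst h; simp at hn
    obtain ⟨m, hm, heq, hmin⟩ := pvGetMaior_spec L hInc hne
    have hsel : pvSel (n + 1) L = (L[m]'hm) :: pvSel n (L.eraseIdx m) := by
      rw [pvSel]
      simp only [hne, if_false]
      rw [heq]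
      simp only [Int.toNat_natCast]
      rw [List.getD_eq_getElem _ _ hm]
    rw [hsel]
    have hlen' : (L.eraseIdx m).length = n := by rw [List.length_eraseIdx]; simp [hm]; omega
    have hinc' : pvInc (L.eraseIdx m) := List.Pairwise.sublist (List.eraseIdx_sublist L m) hInc
    exact ((ih (L.eraseIdx m) hlen' hinc').cons _).trans (List.getElem_cons_eraseIdx_perm hm)

theorem pvSel_pairwise (n : Nat) (L : List (Int × (String × Int × Int))) (hn : L.length = n)
    (hInc : pvInc L) : (pvSel n L).Pairwise (fun a b => pvKey a < pvKey b) := by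
  induction n generalizing L with
  | zero =>
    have hL : L = [] := List.length_eq_zero_iff.mp hn
    subst hL; simp [pvSel]
  | succ n ih =>
    have hne : L ≠ [] := by intro h; subst h; simp at hn
    obtain ⟨m, hm, heq, hmin⟩ := pvGetMaior_spec L hInc hne
    have hsel : pvSel (n + 1) L = (L[m]'hm) :: pvSel n (L.eraseIdx m) := by
      rw [pvSel]
      simp only [hne, if_false]
      rw [heq]
      simp only [Int.toNat_natCast]
      rw [List.getD_eq_getElem _ _ hm]
    rw [hsel]
    have hlen' : (L.eraseIdx m).length = n := by rw [List.length_eraseIdx]; simp [hm]; omega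
    have hinc' : pvInc (L.eraseIdx m) := List.Pairwise.sublist (List.eraseIdx_sublist L m) hInc
    refine List.Pairwise.cons ?_ (ih (L.eraseIdx m) hlen' hinc')
    intro y hy
    have hyL' : y ∈ L.eraseIdx m := (pvSel_perm n (L.eraseIdx m) hlen' hinc').mem_iff.mp hy
    obtain ⟨j, hj, hget⟩ := List.getElem_of_mem hyL'
    rw [List.getElem_eraseIdx] at hget
    split at hget
    · rw [← hget]; exact hmin j (by omega) (by omega)
    · rw [← hget]
      have hjl : j + 1 < L.length := by
        have := hj; rw [List.length_eraseIdx] at this; simp [hm] at this; omega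
      exact hmin (j + 1) hjl (by omega)

theorem pvSorted_eq_sel (n : Nat) (L : List (Int × (String × Int × Int))) (hn : L.length = n)
    (hInc : pvInc L) :
    PySem.List.sorted (L.map pvTriple)
      (fun tr => (toLex (tr.1, toLex (tr.2.1, tr.2.2)) : Int ×ₗ Int ×ₗ Int))
      = (pvSel n L).map pvTriple := by
  apply PySem.List.sorted_eq_of_perm_of_pairwise_lt
  · exact ((pvSel_perm n L hn hInc).map pvTriple)
  · rw [List.pairwise_map]
    have h : ∀ x : Int × (String × Int × Int),
        (toLex ((pvTriple x).1, toLex ((pvTriple x).2.1, (pvTriple x).2.2)) : Int ×ₗ Int ×ₗ Int)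
          = pvKey x := fun x => rfl
    simp only [h]
    exact pvSel_pairwise n L hn hInc

-- ===== VERDICT (by name: the statement is the Claim_ definition above) =====
theorem pvMain (texto : String) (queries : List String) (k : Int)
    (hPre : k ≤ (queries.length : Int)) :
    calcula_top_ocorrencias_de_queries texto queries k
      = calcula_top_ocorrencias_de_queries_alt texto queries k := by
  unfold calcula_top_ocorrencias_de_queries calcula_top_ocorrencias_de_queries_alt
  have hInc : pvInc (pvL texto queries) := by
    unfold pvInc pvL
    rw [List.pairwise_map]
    exact PySem.List.pairwise_lt_enumerate queries 0
  have hn : (pvL texto queries).length = queries.length := by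
    unfold pvL; rw [List.length_map, PySem.List.length_enumerate]
  have hElem : queries.map (fun termo =>
      (termo, (PySem.Str.count texto termo : Int), PySem.Str.find texto termo))
      = (pvL texto queries).map (fun x => x.2) := by
    unfold pvL
    rw [List.map_map]
    have := PySem.List.map_snd_enumerate queries 0
    conv_lhs => rw [← this]
    rw [List.map_map]
    rfl
  have hTri : (PySem.List.enumerate queries).map (fun p =>
      (-(PySem.Str.count texto p.2 : Int), PySem.Str.find texto p.2, p.1))
      = (pvL texto queries).map pvTriple := by
    unfold pvL
    rw [List.map_map]
    rfl
  rw [hElem, hTri]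
  dsimp only
  rw [pvLoopA_eq_sel queries.length (pvL texto queries) hn hInc [] k (by simpa using hPre)]
  rw [pvSorted_eq_sel queries.length (pvL texto queries) hn hInc]
  rw [PySem.List.slice_to _ (by omega : (0:Int) ≤ max k 0)]
  have htn : (max k 0).toNat = (k - (([] : List (String × Int × Int)).length : Int)).toNat := by
    simp; omega
  rw [← List.map_take, htn]
  simp only [List.nil_append, List.map_map]
  apply List.map_congr_left
  intro x hx
  have hxL : x ∈ pvL texto queries :=
    (pvSel_perm queries.length (pvL texto queries) hn hInc).mem_iff.mp (List.mem_of_mem_take hx)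
  unfold pvL at hxL
  rw [List.mem_map] at hxL
  obtain ⟨p, hp, hpx⟩ := hxL
  rw [PySem.List.mem_enumerate_iff] at hp
  obtain ⟨j, hj, hpj⟩ := hp
  subst hpj
  subst hpx
  simp only [Function.comp_apply, pvTriple]
  rw [show ((0 : Int) + (j : Int)) = ((j : Nat) : Int) by omega]
  rw [PySem.List.pyGetD_natCast, List.getD_eq_getElem _ _ hj]

theorem calcula_top_ocorrencias_de_queries_spec : Claim_equal_calcula_top_ocorrencias_de_queries := by
  intro texto queries k _ hPre
  unfold Spec_calcula_top_ocorrencias_de_queries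
  exact pvMain texto queries k hPre
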